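-- pv_equiv track=rewrite | github.com/Virlus/openpi | reward_model/annotate_stage.py | _sanitize_stage_boundaries
-- ===== SOURCE A (Python) =====
-- from typing import Any, Dict, Iterable, List, Sequence, Tuple
--
-- def _sanitize_stage_boundaries(num_steps: int, raw_boundaries: Iterable[Any]) -> List[int]:
--     sanitized: List[int] = []
--     sorted_boundaries = sorted({int(boundary) for boundary in raw_boundaries})
--     for boundary in sorted_boundaries:
--         if 0 <= boundary < num_steps:
--             if not sanitized or boundary > sanitized[-1]:
--                 sanitized.append(boundary)
--     if not sanitized or sanitized[0] != 0:
--         sanitized.insert(0, 0)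
--     return sanitized
-- ===== SOURCE B (Python) =====
-- from typing import Any, Iterable, List
--
-- def _sanitize_stage_boundaries(num_steps: int, raw_boundaries: Iterable[Any]) -> List[int]:
--     # Single pass: keep a sorted duplicate-free result at all times by ordered
--     # insertion, seeded with the mandatory leading 0. No set, no final sort.
--     sanitized: List[int] = [0]
--     for raw in raw_boundaries:
--         b = int(raw)
--         if 0 <= b < num_steps:
--             i = 0
--             while i < len(sanitized) and sanitized[i] < b:
--                 i += 1
--             if i == len(sanitized) or sanitized[i] != b:
--                 sanitized.insert(i, b)
--     return sanitized
-- ===== Notes on version B (the rewrite author's own statement) =====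
-- stated objective: alternative
-- what changed: B never builds a set and never sorts: it maintains a sorted duplicate-free result incrementally by ordered insertion during a single pass over the input, seeded with the mandatory 0, instead of A's set-dedup, full sort, filter-scan and post-loop insert of 0.
import Mathlib
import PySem

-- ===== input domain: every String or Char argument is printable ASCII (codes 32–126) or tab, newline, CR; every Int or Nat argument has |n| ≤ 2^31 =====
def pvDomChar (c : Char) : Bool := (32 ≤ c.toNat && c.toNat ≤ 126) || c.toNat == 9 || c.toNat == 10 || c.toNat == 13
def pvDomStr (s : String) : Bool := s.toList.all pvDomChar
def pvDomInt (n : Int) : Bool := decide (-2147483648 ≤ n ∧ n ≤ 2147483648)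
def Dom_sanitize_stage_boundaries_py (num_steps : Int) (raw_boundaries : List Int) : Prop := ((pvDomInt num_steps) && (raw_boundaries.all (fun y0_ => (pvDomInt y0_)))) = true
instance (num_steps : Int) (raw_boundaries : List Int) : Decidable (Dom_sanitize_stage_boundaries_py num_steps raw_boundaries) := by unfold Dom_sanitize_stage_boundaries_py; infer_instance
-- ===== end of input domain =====

-- B replaces A's set-dedup / full-sort / filter-scan / post-loop-insert-of-0 pipeline by a single
-- pass that keeps a sorted duplicate-free result via ordered insertion, seeded with 0 (alternative).

-- ===== PORT A =====
def sanitize_stage_boundaries_py (num_steps : Int) (raw_boundaries : List Int) : List Int :=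
  let sorted_boundaries := PySem.List.sorted (PySem.Set.ofList raw_boundaries) (fun x => x) false
  let sanitized := sorted_boundaries.foldl
    (fun san b =>
      if 0 ≤ b ∧ b < num_steps then
        if san = [] ∨ PySem.List.pyGetD san (-1) 0 < b then san ++ [b] else san
      else san) []
  if sanitized = [] ∨ ¬ PySem.List.pyGetD sanitized 0 0 = 0 then 0 :: sanitized else sanitized

-- ===== PORT B =====
-- B's inner "scan for the insertion point, insert if absent" loop, transcribed as structural
-- recursion over the sorted accumulator.
def pvInsSorted (san : List Int) (b : Int) : List Int :=
  match san with
  | [] => [b]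
  | x :: t => if x < b then x :: pvInsSorted t b else if x ≠ b then b :: x :: t else x :: t

def sanitize_stage_boundaries_py_alt (num_steps : Int) (raw_boundaries : List Int) : List Int :=
  raw_boundaries.foldl
    (fun sanitized b => if 0 ≤ b ∧ b < num_steps then pvInsSorted sanitized b else sanitized)
    [0]

-- ===== PRECONDITION & SPEC =====
def Spec_sanitize_stage_boundaries_py (num_steps : Int) (raw_boundaries : List Int) (out : List Int) : Prop := out = sanitize_stage_boundaries_py_alt num_steps raw_boundaries
instance (num_steps : Int) (raw_boundaries : List Int) (out : List Int) : Decidable (Spec_sanitize_stage_boundaries_py num_steps raw_boundaries out) := by unfold Spec_sanitize_stage_boundaries_py; infer_instance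

-- ===== CLAIM (what is proved, stated in full; the proofs are below) =====
def Claim_equal_sanitize_stage_boundaries_py : Prop := ∀ (num_steps : Int) (raw_boundaries : List Int), Dom_sanitize_stage_boundaries_py num_steps raw_boundaries → Spec_sanitize_stage_boundaries_py num_steps raw_boundaries (sanitize_stage_boundaries_py num_steps raw_boundaries)

-- ===== LEMMAS AND PROOFS =====

lemma mem_pvInsSorted (san : List Int) (b x : Int) :
    x ∈ pvInsSorted san b ↔ x = b ∨ x ∈ san := by
  induction san with
  | nil => simp [pvInsSorted]
  | cons y t ih =>
    simp only [pvInsSorted]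
    split_ifs with h1 h2
    · simp [ih]; tauto
    · simp
    · simp only [ne_eq, not_not] at h2
      subst h2; simp

lemma pairwise_pvInsSorted (san : List Int) (b : Int) (h : san.Pairwise (· < ·)) :
    (pvInsSorted san b).Pairwise (· < ·) := by
  induction san with
  | nil => simp [pvInsSorted]
  | cons y t ih =>
    rw [List.pairwise_cons] at h
    obtain ⟨hy, ht⟩ := h
    simp only [pvInsSorted]
    split_ifs with h1 h2
    · refine List.pairwise_cons.mpr ⟨?_, ih ht⟩
      intro z hz
      rcases (mem_pvInsSorted t b z).mp hz with h | h
      · exact h ▸ h1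
      · exact hy z h
    · refine List.pairwise_cons.mpr ⟨?_, List.pairwise_cons.mpr ⟨hy, ht⟩⟩
      intro z hz
      have hby : b < y := lt_of_le_of_ne (not_lt.mp h1) (Ne.symm h2)
      rcases List.mem_cons.mp hz with h | h
      · exact h ▸ hby
      · exact lt_trans hby (hy z h)
    · exact List.pairwise_cons.mpr ⟨hy, ht⟩

-- B's fold keeps a sorted duplicate-free accumulator whose members are the seed plus the
-- in-range elements seen so far
lemma foldB (num_steps : Int) :
    ∀ (raw acc : List Int), acc.Pairwise (· < ·) →
      (raw.foldl
        (fun sanitized b => if 0 ≤ b ∧ b < num_steps then pvInsSorted sanitized b else sanitized)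
        acc).Pairwise (· < ·) ∧
      (∀ x : Int,
        x ∈ raw.foldl
          (fun sanitized b => if 0 ≤ b ∧ b < num_steps then pvInsSorted sanitized b else sanitized)
          acc
        ↔ x ∈ acc ∨ (x ∈ raw ∧ 0 ≤ x ∧ x < num_steps)) := by
  intro raw
  induction raw with
  | nil => intro acc h; simpa using h
  | cons b t ih =>
    intro acc h
    simp only [List.foldl_cons]
    by_cases hp : 0 ≤ b ∧ b < num_steps
    · rw [if_pos hp]
      obtain ⟨h1, h2⟩ := ih (pvInsSorted acc b) (pairwise_pvInsSorted acc b h)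
      refine ⟨h1, fun x => ?_⟩
      rw [h2 x, mem_pvInsSorted]
      constructor
      · rintro ((h | h) | h)
        · exact Or.inr ⟨h ▸ List.mem_cons_self .., h ▸ hp⟩
        · exact Or.inl h
        · exact Or.inr ⟨List.mem_cons_of_mem _ h.1, h.2⟩
      · rintro (h | ⟨hm, hr⟩)
        · exact Or.inl (Or.inr h)
        · rcases List.mem_cons.mp hm with h | h
          · exact Or.inl (Or.inl h)
          · exact Or.inr ⟨h, hr⟩
    · rw [if_neg hp]
      obtain ⟨h1, h2⟩ := ih acc h
      refine ⟨h1, fun x => ?_⟩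
      rw [h2 x]
      constructor
      · rintro (h | h)
        · exact Or.inl h
        · exact Or.inr ⟨List.mem_cons_of_mem _ h.1, h.2⟩
      · rintro (h | ⟨hm, hr⟩)
        · exact Or.inl h
        · rcases List.mem_cons.mp hm with h | h
          · exact absurd (h ▸ hr) hp
          · exact Or.inr ⟨h, hr⟩

lemma head_zero (F : List Int) (hFp : F.Pairwise (· < ·)) (hF0 : ∀ x ∈ F, 0 ≤ x)
    (h0 : (0 : Int) ∈ F) : PySem.List.pyGetD F 0 0 = 0 := by
  cases F with
  | nil => simp at h0
  | cons f t =>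
    rw [PySem.List.pyGetD_zero_cons]
    rcases List.mem_cons.mp h0 with h | h
    · exact h.symm
    · have h1 := (List.pairwise_cons.mp hFp).1 0 h
      have h2 := hF0 f (List.mem_cons_self ..)
      omega

lemma zero_mem (F : List Int) (hne : F ≠ []) (h : PySem.List.pyGetD F 0 0 = 0) :
    (0 : Int) ∈ F := by
  cases F with
  | nil => exact absurd rfl hne
  | cons f t =>
    rw [PySem.List.pyGetD_zero_cons] at h
    exact h ▸ List.mem_cons_self ..

-- A's filtering fold over a strictly increasing list is just filter
lemma foldA (num_steps : Int) :
    ∀ (l san : List Int), l.Pairwise (· < ·) → san.Pairwise (· < ·) →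
      (∀ a ∈ san, ∀ b ∈ l, a < b) →
      l.foldl
        (fun san b =>
          if 0 ≤ b ∧ b < num_steps then
            if san = [] ∨ PySem.List.pyGetD san (-1) 0 < b then san ++ [b] else san
          else san) san
      = san ++ l.filter (fun b => decide (0 ≤ b ∧ b < num_steps)) := by
  intro l
  induction l with
  | nil => intro san _ _ _; simp
  | cons b t ih =>
    intro san hl hsan hlt
    rw [List.pairwise_cons] at hl
    obtain ⟨hb, ht⟩ := hl
    simp only [List.foldl_cons, List.filter_cons]
    by_cases hp : 0 ≤ b ∧ b < num_steps
    · have hcond : san = [] ∨ PySem.List.pyGetD san (-1) 0 < b := by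
        rcases eq_or_ne san [] with h | h
        · exact Or.inl h
        · refine Or.inr (hlt _ (PySem.List.pyGetD_mem (xs := san) (i := -1) (d := 0) ?_) b (List.mem_cons_self ..))
          have hpos := List.length_pos_iff.mpr h
          simp only [PySem.Raise.InRange]
          omega
      rw [if_pos hp, if_pos hcond, ih (san ++ [b]) ht ?_ ?_]
      · simp [hp, List.append_assoc]
      · refine List.pairwise_append.mpr ⟨hsan, List.pairwise_singleton .., ?_⟩
        intro a ha c hc
        simp only [List.mem_singleton] at hc
        exact hc ▸ hlt a ha b (List.mem_cons_self ..)
      · intro a ha c hc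
        rcases List.mem_append.mp ha with h | h
        · exact hlt a h c (List.mem_cons_of_mem _ hc)
        · simp only [List.mem_singleton] at h
          exact h ▸ hb c hc
    · rw [if_neg hp, ih san ht hsan (fun a ha c hc => hlt a ha c (List.mem_cons_of_mem _ hc))]
      simp [hp]

theorem sanitize_stage_boundaries_py_spec : Claim_equal_sanitize_stage_boundaries_py := by
  unfold Claim_equal_sanitize_stage_boundaries_py
  intro num_steps raw _
  unfold Spec_sanitize_stage_boundaries_py
  simp only [sanitize_stage_boundaries_py, sanitize_stage_boundaries_py_alt]
  rw [foldA num_steps _ [] (PySem.List.sorted_ofList_pairwise_lt raw) List.Pairwise.nil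
      (by intro a ha; simp at ha)]
  simp only [List.nil_append]
  obtain ⟨hRp, hRm'⟩ := foldB num_steps raw [0] (List.pairwise_singleton ..)
  set pb := fun b : Int => decide (0 ≤ b ∧ b < num_steps) with hpb
  set F := (PySem.List.sorted (PySem.Set.ofList raw) (fun x => x) false).filter pb with hFdef
  set R := raw.foldl
      (fun sanitized b => if 0 ≤ b ∧ b < num_steps then pvInsSorted sanitized b else sanitized)
      [0] with hRdef
  have hRm : ∀ x : Int, x ∈ R ↔ (x = 0 ∨ (x ∈ raw ∧ pb x = true)) := by
    intro x
    rw [hRm' x, List.mem_singleton, hpb]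
    simp
  have hFp : F.Pairwise (· < ·) :=
    List.Pairwise.filter _ (PySem.List.sorted_ofList_pairwise_lt raw)
  have hFm : ∀ x : Int, x ∈ F ↔ (x ∈ raw ∧ pb x = true) := by
    intro x
    rw [hFdef, List.mem_filter, PySem.List.mem_sorted, PySem.Set.mem_ofList]
  have hF0 : ∀ x ∈ F, 0 ≤ x := by
    intro x hx
    have h := ((hFm x).mp hx).2
    rw [hpb] at h
    exact (of_decide_eq_true h).1
  split_ifs with hc
  · have hL0 : ∀ y ∈ F, 0 < y := by
      intro y hy
      rcases lt_or_eq_of_le (hF0 y hy) with h | h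
      · exact h
      · exfalso
        rcases hc with h' | h'
        · rw [h'] at hy; simp at hy
        · exact h' (head_zero F hFp hF0 (h ▸ hy))
    have hLp : (0 :: F).Pairwise (· < ·) := List.pairwise_cons.mpr ⟨hL0, hFp⟩
    have hLm : ∀ x : Int, x ∈ (0 :: F) ↔ x ∈ R := by
      intro x
      rw [List.mem_cons, hRm x, hFm x]
    exact List.Perm.eq_of_pairwise (fun a b _ _ h h' => absurd h' (lt_asymm h)) hLp hRp
      ((List.perm_ext_iff_of_nodup (hLp.imp ne_of_lt) (hRp.imp ne_of_lt)).mpr hLm)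
  · have hne : F ≠ [] := fun h => hc (Or.inl h)
    have h0 : PySem.List.pyGetD F 0 0 = 0 := not_not.mp (fun h => hc (Or.inr h))
    have h0F : (0 : Int) ∈ F := zero_mem F hne h0
    have hLm : ∀ x : Int, x ∈ F ↔ x ∈ R := by
      intro x
      rw [hRm x, hFm x]
      constructor
      · exact fun h => Or.inr h
      · rintro (h | h)
        · exact h ▸ (hFm 0).mp h0F
        · exact h
    exact List.Perm.eq_of_pairwise (fun a b _ _ h h' => absurd h' (lt_asymm h)) hFp hRp
      ((List.perm_ext_iff_of_nodup (hFp.imp ne_of_lt) (hRp.imp ne_of_lt)).mpr hLm)
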